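-- pv_equiv track=rewrite | github.com/marcolos/DataSecurity | Esercizi_1set/vigenere_attack.py | getSubstrings
-- ===== SOURCE A (Python) =====
-- def getSubstrings(text, m):
-- 	""" Divide il testo in sottostringhe, ognuna di dimensione ceil(len(text)/m))
-- 	Il testo viene diviso scrivendo "per colonne"
-- 	:param text: testo da suddividere
-- 	:param m: numero di righe in cui suddividere il testo
-- 	:return: lista di sottostringhe scritte per colonna
-- 	"""
--
-- 	substrings = []
-- 	for i in range(0,m):
-- 		txt = ''
-- 		for j in range(i,len(text),m):
-- 			txt = txt + text[j]
-- 		substrings.append(txt)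
--
-- 	return substrings
-- ===== SOURCE B (Python) =====
-- def getSubstrings(text, m):
--     if m <= 0:
--         return []
--     buckets = [[] for _ in range(m)]
--     for idx, ch in enumerate(text):
--         buckets[idx % m].append(ch)
--     return [''.join(b) for b in buckets]
-- ===== Notes on version B (the rewrite author's own statement) =====
-- stated objective: alternative
-- what changed: One forward pass over the text scattering each character into buckets[idx % m] with list accumulators joined at the end, instead of A's m column-major gathering passes building each substring by repeated concatenation.
import Mathlib
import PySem

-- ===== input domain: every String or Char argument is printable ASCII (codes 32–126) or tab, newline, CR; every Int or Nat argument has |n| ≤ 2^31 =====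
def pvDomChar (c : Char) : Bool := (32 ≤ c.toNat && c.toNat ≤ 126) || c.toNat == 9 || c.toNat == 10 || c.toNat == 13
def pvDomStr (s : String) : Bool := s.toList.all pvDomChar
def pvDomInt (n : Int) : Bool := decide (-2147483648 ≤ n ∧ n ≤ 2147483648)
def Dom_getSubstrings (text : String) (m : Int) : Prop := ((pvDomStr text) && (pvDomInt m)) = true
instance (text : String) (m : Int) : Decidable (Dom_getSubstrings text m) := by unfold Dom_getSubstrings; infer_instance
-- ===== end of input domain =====

-- B replaces A's m column-gathering passes by a single forward scatter pass into m buckets (one accumulator per column).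

-- ===== PORT A =====
-- literal port of A: for i in range(0, m): txt = ''; for j in range(i, len(text), m): txt = txt + text[j]; substrings.append(txt)
-- (text[j] is ported with pyGetD: j is always in range since i ≤ j < len(text))
def getSubstrings (text : String) (m : Int) : List String :=
  (PySem.List.pyRange 0 m 1).foldl
    (fun substrings i =>
      substrings ++
        [String.ofList ((PySem.List.pyRange i (PySem.List.len text.toList) m).foldl
          (fun txt j => txt ++ [PySem.List.pyGetD text.toList j ' ']) [])])
    []

-- ===== PORT B =====
-- literal port of Source B: m empty buckets, one pass appending each char to buckets[idx % m], then join each bucket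
-- (buckets[idx % m] read/write is ported with pyGetD/pySetD: 0 ≤ idx % m < m is always in range)
def getSubstrings_alt (text : String) (m : Int) : List String :=
  if m ≤ 0 then []
  else
    ((PySem.List.enumerate text.toList).foldl
      (fun buckets p =>
        PySem.List.pySetD buckets (PySem.Int.mod p.1 m)
          (PySem.List.pyGetD buckets (PySem.Int.mod p.1 m) [] ++ [p.2]))
      (List.replicate m.toNat ([] : List Char))).map String.ofList

-- ===== PRECONDITION & SPEC =====
def Spec_getSubstrings (text : String) (m : Int) (out : List String) : Prop := out = getSubstrings_alt text m
instance (text : String) (m : Int) (out : List String) : Decidable (Spec_getSubstrings text m out) := by unfold Spec_getSubstrings; infer_instance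

-- ===== CLAIM (what is proved, stated in full; the proofs are below) =====
def Claim_equal_getSubstrings : Prop := ∀ (text : String) (m : Int), Dom_getSubstrings text m → Spec_getSubstrings text m (getSubstrings text m)

-- ===== LEMMAS AND PROOFS =====

-- common normal form: column k of cs modulo M, purely over Nat indices
def pvCol (cs : List Char) (M k : Nat) : List Char :=
  ((List.range cs.length).filter (fun j => j % M == k)).map (fun j => cs.getD j ' ')

-- two strictly increasing integer lists with the same members are equal
theorem pv_eq_of_pairwise_lt_of_mem_iff (l₁ l₂ : List Int)
    (h1 : List.Pairwise (· < ·) l₁) (h2 : List.Pairwise (· < ·) l₂)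
    (h : ∀ x, x ∈ l₁ ↔ x ∈ l₂) : l₁ = l₂ := by
  have n1 : l₁.Nodup := h1.imp ne_of_lt
  have n2 : l₂.Nodup := h2.imp ne_of_lt
  have p : l₁.Perm l₂ := List.perm_of_nodup_nodup_toFinset_eq n1 n2 (by ext x; simp [h x])
  exact p.eq_of_pairwise (le := (· ≤ ·)) (fun a b _ _ hab hba => le_antisymm hab hba)
    (h1.imp le_of_lt) (h2.imp le_of_lt)

-- A's stride-m range IS the filtered index range
theorem pv_range_step (M k n : Nat) (hk : k < M) :
    PySem.List.pyRange (k : Int) (n : Int) (M : Int)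
      = ((List.range n).filter (fun j => j % M == k)).map (fun j : Nat => (j : Int)) := by
  have hM : (0 : Int) < (M : Int) := by omega
  refine pv_eq_of_pairwise_lt_of_mem_iff _ _ ?_ ?_ ?_
  · rw [PySem.List.pyRange_of_pos _ _ hM]
    exact List.pairwise_map.mpr (List.pairwise_lt_range.imp (fun {a b} hab => by
      have := Int.mul_lt_mul_of_pos_left (by exact_mod_cast hab : (a : Int) < b) hM
      omega))
  · exact List.pairwise_map.mpr ((List.pairwise_filter.mpr
      (List.pairwise_lt_range.imp (fun {a b} hab _ _ => hab))).imp
      (fun {a b} hab => by exact_mod_cast hab))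
  · intro x
    rw [PySem.List.mem_pyRange_iff_of_pos hM]
    simp only [List.mem_map, List.mem_filter, List.mem_range, beq_iff_eq]
    constructor
    · rintro ⟨hkx, hxn, d, hd⟩
      have hx0 : 0 ≤ x := le_trans (by exact_mod_cast Nat.zero_le k) hkx
      refine ⟨x.toNat, ⟨by omega, ?_⟩, by omega⟩
      have hxmod : x % (M : Int) = (k : Int) := by
        have : x = (k : Int) + (M : Int) * d := by omega
        rw [this, Int.add_mul_emod_self_left, Int.emod_eq_of_lt (by exact_mod_cast Nat.zero_le k)
          (by exact_mod_cast hk)]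
      have : ((x.toNat % M : Nat) : Int) = (k : Int) := by
        push_cast
        rw [Int.toNat_of_nonneg hx0, hxmod]
      exact_mod_cast this
    · rintro ⟨j, ⟨hjn, hjk⟩, rfl⟩
      have hkj : k ≤ j := hjk ▸ Nat.mod_le j M
      refine ⟨by exact_mod_cast hkj, by exact_mod_cast hjn, ?_⟩
      have : (M : Int) ∣ ((j - k : Nat) : Int) := by
        exact_mod_cast Int.natCast_dvd_natCast.mpr (hjk ▸ Nat.dvd_sub_mod j)
      have heq : ((j - k : Nat) : Int) = (j : Int) - (k : Int) := by omega
      rwa [heq] at this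

-- appending one character to the text appends it to exactly one column
theorem pvCol_append_singleton (ds : List Char) (c : Char) (M i : Nat) :
    pvCol (ds ++ [c]) M i
      = pvCol ds M i ++ (if ds.length % M == i then [c] else []) := by
  unfold pvCol
  rw [List.length_append, List.length_singleton, List.range_succ, List.filter_append,
    List.map_append]
  congr 1
  · refine List.map_congr_left (fun j hj => ?_)
    have hjn : j < ds.length := List.mem_range.mp (List.mem_filter.mp hj).1
    simp [List.getD, List.getElem?_append_left hjn]
  · by_cases h : ds.length % M == i
    · simp [List.filter_singleton, h, List.getD]
    · simp [List.filter_singleton, h]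

-- scatter invariant: folding B's step over enumerate builds exactly the columns
theorem pv_scatter (M : Nat) (hM : 0 < M) (cs : List Char) :
    (PySem.List.enumerate cs).foldl
      (fun buckets p =>
        PySem.List.pySetD buckets (PySem.Int.mod p.1 (M : Int))
          (PySem.List.pyGetD buckets (PySem.Int.mod p.1 (M : Int)) [] ++ [p.2]))
      (List.replicate M ([] : List Char))
    = (List.range M).map (fun k => pvCol cs M k) := by
  induction cs using List.reverseRecOn with
  | nil => simp [PySem.List.enumerate, pvCol]
  | append_singleton ds c ih =>
    rw [PySem.List.enumerate_append, List.foldl_append, ih]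
    have ht : ds.length % M < M := Nat.mod_lt _ hM
    have hmod : PySem.Int.mod ((0 : Int) + (ds.length : Int)) (M : Int)
        = ((ds.length % M : Nat) : Int) := by
      rw [zero_add]
      exact PySem.Int.mod_natCast ds.length M
    simp only [PySem.List.enumerate, List.foldl_cons, List.foldl_nil, hmod,
      PySem.List.pySetD_natCast, PySem.List.pyGetD_natCast]
    have hget : ((List.range M).map (fun k => pvCol ds M k)).getD (ds.length % M) []
        = pvCol ds M (ds.length % M) := by
      simp [List.getD, List.getElem?_map, List.getElem?_range ht]
    rw [hget]
    refine List.ext_getElem (by simp) (fun i hi₁ hi₂ => ?_)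
    have hiM : i < M := by simpa using hi₂
    rw [List.getElem_set]
    simp only [List.getElem_map, List.getElem_range, pvCol_append_singleton]
    by_cases h : ds.length % M = i
    · simp [h]
    · have : (ds.length % M == i) = false := by simp [h]
      simp [h, this]

-- ===== VERDICT (by name: the statement is the Claim_ definition above) =====
theorem getSubstrings_spec : Claim_equal_getSubstrings := by
  intro text m _
  unfold Spec_getSubstrings getSubstrings getSubstrings_alt
  by_cases hm : m ≤ 0
  · rw [if_pos hm, PySem.List.pyRange_one_eq_nil hm]
    rfl
  · rw [if_neg hm]
    rw [not_le] at hm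
    obtain ⟨M, rfl⟩ : ∃ M : Nat, m = (M : Int) := ⟨m.toNat, (Int.toNat_of_nonneg hm.le).symm⟩
    have hM : 0 < M := by exact_mod_cast hm
    rw [Int.toNat_natCast, pv_scatter M hM]
    simp only [PySem.List.foldl_append_singleton_eq_map, List.nil_append,
      PySem.List.len_eq, PySem.List.pyRange_zero_nat, List.map_map]
    refine List.map_congr_left (fun k hk => ?_)
    rw [Function.comp_apply, pv_range_step M k text.toList.length (List.mem_range.mp hk)]
    simp [pvCol, ← List.map_eq_flatMap, List.map_map, Function.comp_def]
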